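-- pv_equiv track=rewrite | github.com/rociozhong/Function-in-Python | assign2_atlantic.py | get_storm_occurence
-- ===== SOURCE A (Python) =====
-- def get_storm_occurence(storm: list) -> dict:
--     """
--     make a dictionary: key- year, value -- occurrence of storms
--
--     :param storm: list of dictionaries, and each dictionary consists of a specific storm
--     :return: storm occurrence per year as a dictionary, whose keys are 'year', and values, 'occurrence of storm'
--     """
--     temp_1 = {}
--     for each_cyclone in storm:   # loop each dictionary in the list
--         year = each_cyclone["id"][-4::]   # extract the year for each storm in the dictionary
--         if temp_1.get(year):  # dict.get(x), if x not in the keys of dict, then return None (first time appearance)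
--             temp_1[year] += 1
--         else:
--             temp_1[year] = 1
--
--     return temp_1
-- ===== SOURCE B (Python) =====
-- def get_storm_occurence(storm: list) -> dict:
--     years = [c["id"][-4:] for c in storm]
--     return {y: years.count(y) for y in dict.fromkeys(years)}
-- ===== Notes on version B (the rewrite author's own statement) =====
-- stated objective: simpler
-- what changed: Replaces the accumulating get/branch/update loop with a two-phase pass: extract all year strings first, then build the dict by counting each distinct year (first-occurrence order via dict.fromkeys).
import Mathlib
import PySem

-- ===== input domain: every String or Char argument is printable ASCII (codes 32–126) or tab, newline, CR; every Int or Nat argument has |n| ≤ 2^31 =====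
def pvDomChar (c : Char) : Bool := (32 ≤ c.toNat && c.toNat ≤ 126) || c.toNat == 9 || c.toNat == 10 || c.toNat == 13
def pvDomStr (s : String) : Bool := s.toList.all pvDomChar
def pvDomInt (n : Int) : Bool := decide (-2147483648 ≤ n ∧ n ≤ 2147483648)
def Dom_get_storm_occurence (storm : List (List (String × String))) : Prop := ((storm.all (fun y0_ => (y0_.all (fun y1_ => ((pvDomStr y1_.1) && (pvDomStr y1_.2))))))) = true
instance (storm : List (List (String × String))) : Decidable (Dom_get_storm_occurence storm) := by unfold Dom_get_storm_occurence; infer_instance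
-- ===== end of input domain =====

-- B builds the dict in two phases (extract all year strings, then count each distinct year)
-- instead of A's accumulating get/branch/update loop; objective: simpler. Not faster.

-- year = each_cyclone["id"][-4::]  (Pre_ guarantees the key exists; the getD "" default is never reached there)
def pvYear (c : List (String × String)) : String :=
  PySem.Str.slice (((PySem.Dict.mk c).get? "id").getD "") (some (-4)) none

-- A's loop body: temp_1.get(year) is falsy for a missing key (None) and for the int 0
def pvStepA (d : PySem.Dict String Int) (year : String) : PySem.Dict String Int :=
  match d.get? year with
  | some v => if v ≠ 0 then d.insert year (v + 1) else d.insert year 1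
  | none => d.insert year 1

-- ===== PORT A =====
def get_storm_occurence (storm : List (List (String × String))) : List (String × Int) :=
  (storm.foldl (fun d c => pvStepA d (pvYear c)) PySem.Dict.empty).items

-- ===== PORT B =====
def get_storm_occurence_alt (storm : List (List (String × String))) : List (String × Int) :=
  let years := storm.map pvYear
  ((PySem.List.dedup years).foldl
    (fun (d : PySem.Dict String Int) y => d.insert y ((years.count y : Int)))
    PySem.Dict.empty).items

-- ===== PRECONDITION & SPEC =====
-- Pre_ excludes exactly the inputs where some storm dict lacks the key "id": there A raises KeyError (and so does B).
def Pre_get_storm_occurence (storm : List (List (String × String))) : Prop :=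
  ∀ c ∈ storm, (PySem.Dict.mk c).contains "id" = true
instance (storm : List (List (String × String))) : Decidable (Pre_get_storm_occurence storm) := by unfold Pre_get_storm_occurence; infer_instance
def pvWitness_get_storm_occurence : (List (List (String × String))) := [[("id", "AL011999")], [("id", "AL012000")]]

def Spec_get_storm_occurence (storm : List (List (String × String))) (out : List (String × Int)) : Prop := out = get_storm_occurence_alt storm
instance (storm : List (List (String × String))) (out : List (String × Int)) : Decidable (Spec_get_storm_occurence storm out) := by unfold Spec_get_storm_occurence; infer_instance

-- ===== CLAIM (what is proved, stated in full; the proofs are below) =====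
def Claim_equal_get_storm_occurence : Prop := ∀ (storm : List (List (String × String))), Dom_get_storm_occurence storm → Pre_get_storm_occurence storm → Spec_get_storm_occurence storm (get_storm_occurence storm)

-- ===== LEMMAS AND PROOFS =====

-- A's loop body, on a dict whose stored values are all positive, is the counter step d.insert y (d.getD y 0 + 1).
theorem pvStepA_eq_counter_step (d : PySem.Dict String Int) (y : String)
    (h : ∀ v, ∀ k, d.get? k = some v → 0 < v) :
    pvStepA d y = d.insert y (d.getD y 0 + 1) := by
  unfold pvStepA
  cases hg : d.get? y with
  | none => simp [PySem.Dict.getD_of_get?_eq_none d 0 hg]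
  | some v =>
    have hv : 0 < v := h v y hg
    show (if v ≠ 0 then d.insert y (v + 1) else d.insert y 1) = d.insert y (d.getD y 0 + 1)
    rw [PySem.Dict.getD_of_get?_eq_some d 0 hg, if_pos (by omega : v ≠ 0)]

-- Folding A's step over any list from a positive-valued dict equals folding the counter step.
theorem pvFoldA_eq_fold_counter (ys : List String) :
    ∀ (d : PySem.Dict String Int), (∀ v, ∀ k, d.get? k = some v → 0 < v) →
    ys.foldl pvStepA d
    = ys.foldl (fun (d : PySem.Dict String Int) y => d.insert y (d.getD y 0 + 1)) d := by
  induction ys with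
  | nil => intro d _; rfl
  | cons y ys ih =>
    intro d h
    simp only [List.foldl_cons, pvStepA_eq_counter_step d y h]
    apply ih
    intro v k hk
    rw [PySem.Dict.get?_insert] at hk
    by_cases hky : k = y
    · subst hky
      rw [if_pos rfl] at hk
      injection hk with hk
      cases hg : d.get? k with
      | none => rw [PySem.Dict.getD_of_get?_eq_none d 0 hg] at hk; omega
      | some w => have hw := h w k hg; rw [PySem.Dict.getD_of_get?_eq_some d 0 hg] at hk; omega
    · rw [if_neg hky] at hk
      exact h v k hk

-- ===== VERDICT (by name: the statement is the Claim_ definition above) =====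
theorem get_storm_occurence_spec : Claim_equal_get_storm_occurence := by
  intro storm _ _
  unfold Spec_get_storm_occurence get_storm_occurence get_storm_occurence_alt
  rw [← List.foldl_map]
  rw [pvFoldA_eq_fold_counter (storm.map pvYear) PySem.Dict.empty
      (by intro v k hk; simp [PySem.Dict.get?_empty] at hk)]
  rw [PySem.Dict.foldl_insert_getD_add_one_eq_counter, PySem.Dict.items_counter]
  rw [PySem.Dict.items_foldl_insert_fresh (PySem.List.dedup (storm.map pvYear))
        (fun y => y) (fun y => ((storm.map pvYear).count y : Int)) PySem.Dict.empty
        (by intro a _; simp [PySem.Dict.contains_empty])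
        (by simp)]
  simp [PySem.Dict.empty, PySem.List.dedup_eq_ofList]
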